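-- pv_equiv track=rewrite | github.com/MrBrantCode/unitest_baseline | mut_generate/mist_train_cf/cf_32581/solution.py | make_pretty
-- ===== SOURCE A (Python) =====
-- def make_pretty(dimensions, linear_structure):
--     rows, cols = dimensions
--     ballot_representation = ''
--     for i in range(rows):
--         row_representation = ''
--         for j in range(cols):
--             if linear_structure[i * cols + j] == 1:
--                 row_representation += '*'
--             else:
--                 row_representation += ' '
--         ballot_representation += row_representation + '\n'
--     return ballot_representation
-- ===== SOURCE B (Python) =====
-- def make_pretty(dimensions, linear_structure):
--     rows, cols = dimensions
--     cells = ''.join('*' if x == 1 else ' ' for x in linear_structure)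
--     return ''.join(cells[r * cols:(r + 1) * cols] + '\n' for r in range(rows))
-- ===== Notes on version B (the rewrite author's own statement) =====
-- stated objective: idiomatic
-- what changed: Replaces the nested index-arithmetic loops (linear_structure[i*cols+j] with += concatenation) by one flat map of the whole list to a star/space string followed by a slice per row; Pre_ excludes the inputs where A raises IndexError (list shorter than rows*cols with positive dimensions) and the accidental corner of a negative column count with positive rows and a list longer than -cols, where A's rows-empty-lines value (empty range) and B's negative-slice value are both implementation artefacts and differ.
-- outside the precondition, e.g. on make_pretty((2, -1), [1, 0, 1]): A returns '\n\n', B returns '* \n\n'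
import Mathlib
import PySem

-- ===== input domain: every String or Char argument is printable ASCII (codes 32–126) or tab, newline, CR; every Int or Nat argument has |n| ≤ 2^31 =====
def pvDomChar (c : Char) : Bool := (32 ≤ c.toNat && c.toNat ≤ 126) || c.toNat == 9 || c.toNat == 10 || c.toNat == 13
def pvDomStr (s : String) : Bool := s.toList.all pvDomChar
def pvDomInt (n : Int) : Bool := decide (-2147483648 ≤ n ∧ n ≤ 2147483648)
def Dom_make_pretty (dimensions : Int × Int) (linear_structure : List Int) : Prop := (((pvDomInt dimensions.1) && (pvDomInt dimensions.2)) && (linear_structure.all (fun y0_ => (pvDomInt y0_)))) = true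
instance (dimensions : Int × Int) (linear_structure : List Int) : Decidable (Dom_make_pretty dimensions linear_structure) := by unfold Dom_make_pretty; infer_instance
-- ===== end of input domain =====

-- B replaces A's nested index-arithmetic loops with one flat char map plus a slice per row (idiomatic rewrite, same cost).
-- Strings are built as their character lists (String.ofList) since Lean's String.append is opaque to the kernel.

-- ===== PORT A =====
-- literal port of A: for i in range(rows): for j in range(cols): += '*'/' '; += row + '\n'
-- linear_structure[i*cols+j] is ported as pyGetD with default 0, exact under Pre_ (the index is in range there).
def make_pretty (dimensions : Int × Int) (linear_structure : List Int) : String :=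
  let rows := dimensions.1
  let cols := dimensions.2
  let ballot : List Char :=
    (PySem.List.pyRange 0 rows 1).foldl (fun acc i =>
      let row : List Char :=
        (PySem.List.pyRange 0 cols 1).foldl (fun racc j =>
          racc ++ [if PySem.List.pyGetD linear_structure (i * cols + j) 0 == 1 then '*' else ' ']) []
      acc ++ (row ++ ['\n'])) []
  String.ofList ballot

-- ===== PORT B =====
-- literal port of Source B: cells = flat map of the list to '*'/' '; join of cells[r*cols:(r+1)*cols] + '\n' per row
def make_pretty_alt (dimensions : Int × Int) (linear_structure : List Int) : String :=
  let rows := dimensions.1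
  let cols := dimensions.2
  let cells : List Char := linear_structure.map (fun x => if x == 1 then '*' else ' ')
  String.ofList (((PySem.List.pyRange 0 rows 1).map (fun r =>
    PySem.List.slice cells (some (r * cols)) (some ((r + 1) * cols)) ++ ['\n'])).flatten)

-- ===== PRECONDITION & SPEC =====
-- Pre_ excludes (a) the inputs where A raises IndexError (positive rows and cols with the list shorter
-- than rows*cols) and (b) the accidental corner of negative cols with positive rows and a list longer
-- than -cols, where A's value (rows empty lines, from the empty range) and B's value (negative-index
-- slices) are both implementation artefacts and actually differ.
def Pre_make_pretty (dimensions : Int × Int) (linear_structure : List Int) : Prop :=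
  dimensions.1 ≤ 0 ∨ (0 ≤ dimensions.2 ∧ dimensions.1 * dimensions.2 ≤ (linear_structure.length : Int))
    ∨ (dimensions.2 < 0 ∧ (linear_structure.length : Int) ≤ -dimensions.2)
instance (dimensions : Int × Int) (linear_structure : List Int) : Decidable (Pre_make_pretty dimensions linear_structure) := by unfold Pre_make_pretty; infer_instance
def pvWitness_make_pretty : (Int × Int) × List Int := ((2, 2), [1, 0, 0, 1])
def Spec_make_pretty (dimensions : Int × Int) (linear_structure : List Int) (out : String) : Prop := out = make_pretty_alt dimensions linear_structure
instance (dimensions : Int × Int) (linear_structure : List Int) (out : String) : Decidable (Spec_make_pretty dimensions linear_structure out) := by unfold Spec_make_pretty; infer_instance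

-- ===== CLAIM (what is proved, stated in full; the proofs are below) =====
def Claim_equal_make_pretty : Prop := ∀ (dimensions : Int × Int) (linear_structure : List Int), Dom_make_pretty dimensions linear_structure → Pre_make_pretty dimensions linear_structure → Spec_make_pretty dimensions linear_structure (make_pretty dimensions linear_structure)

-- ===== LEMMAS AND PROOFS =====

-- a slice of length c starting at a (with a+c within bounds) is the map of the shifted indices
theorem drop_take_eq_map_range {α : Type} [Inhabited α] (xs : List α) (a c : Nat) (h : a + c ≤ xs.length) :
    (xs.drop a).take c = (List.range c).map (fun k => xs.getD (a + k) default) := by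
  apply List.ext_getElem
  · simp; omega
  · intro n h1 h2
    simp only [List.length_take, List.length_drop] at h1
    simp only [List.getElem_take, List.getElem_drop, List.getElem_map, List.getElem_range]
    rw [List.getD_eq_getElem _ _ (by omega)]

-- one row of A equals one row of B, for 0 ≤ i and 0 ≤ cols under Pre_
theorem row_eq (cols : Int) (ls : List Int) (i : Int) (hi : 0 ≤ i) (hc0 : 0 ≤ cols)
    (hlen : 0 < cols → (i + 1) * cols ≤ (ls.length : Int)) :
    (PySem.List.pyRange 0 cols 1).map
        (fun j => if PySem.List.pyGetD ls (i * cols + j) 0 == 1 then '*' else ' ')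
      = PySem.List.slice (ls.map (fun x => if x == 1 then '*' else ' '))
          (some (i * cols)) (some ((i + 1) * cols)) := by
  by_cases hc : 0 < cols
  · have ha : 0 ≤ i * cols := mul_nonneg hi (le_of_lt hc)
    have hb : 0 ≤ (i + 1) * cols := mul_nonneg (by omega) (le_of_lt hc)
    rw [PySem.List.slice_toNat _ ha hb]
    have hbe : ((i + 1) * cols).toNat = (i * cols).toNat + cols.toNat := by
      have : (i + 1) * cols = i * cols + cols := by ring
      omega
    rw [hbe, Nat.add_sub_cancel_left]
    have hle : (i * cols).toNat + cols.toNat ≤ (ls.map (fun x => if x == 1 then '*' else ' ')).length := by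
      have := hlen hc
      simp only [List.length_map]
      omega
    rw [drop_take_eq_map_range _ _ _ hle]
    rw [PySem.List.pyRange_one]
    simp only [List.map_map, Int.sub_zero]
    apply List.map_congr_left
    intro k hk
    simp only [List.mem_range] at hk
    simp only [Function.comp_apply, zero_add]
    have hidx0 : 0 ≤ i * cols + (k : Int) := by positivity
    have hidx1 : i * cols + (k : Int) < (ls.length : Int) := by
      have := hlen hc
      have h2 : i * cols + (k : Int) < (i + 1) * cols := by
        have : (i + 1) * cols = i * cols + cols := by ring
        omega
      omega
    rw [PySem.List.pyGetD_eq_getElem ls 0 hidx0 hidx1]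
    have ht : (i * cols + (k : Int)).toNat = (i * cols).toNat + k := by omega
    have hlt : (i * cols).toNat + k < ls.length := by omega
    rw [List.getD_eq_getElem _ _ (by simpa using hlt)]
    simp [ht]
  · have hc' : cols = 0 := by omega
    subst hc'
    have hr : PySem.List.pyRange 0 0 1 = [] := by
      rw [PySem.List.pyRange_one]
      simp
    rw [hr]
    have h0 : i * (0:Int) = 0 := mul_zero i
    have h1 : (i + 1) * (0:Int) = 0 := mul_zero _
    rw [h0, h1]
    rw [PySem.List.slice_toNat _ le_rfl le_rfl]
    simp

-- with negative cols and a list no longer than -cols, A's row is the empty range and B's slice is empty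
theorem row_eq_neg (cols : Int) (ls : List Int) (i : Int) (hi : 0 ≤ i) (hc : cols < 0)
    (hlen : (ls.length : Int) ≤ -cols) :
    (PySem.List.pyRange 0 cols 1).map
        (fun j => if PySem.List.pyGetD ls (i * cols + j) 0 == 1 then '*' else ' ')
      = PySem.List.slice (ls.map (fun x => if x == 1 then '*' else ' '))
          (some (i * cols)) (some ((i + 1) * cols)) := by
  have hr : PySem.List.pyRange 0 cols 1 = [] := by
    rw [PySem.List.pyRange_one]
    simp
    omega
  rw [hr, List.map_nil]
  symm
  apply List.eq_nil_of_length_eq_zero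
  rw [PySem.List.length_slice]
  have hb : (i + 1) * cols = -(((-( (i + 1) * cols)).toNat : Int)) := by
    have : (i + 1) * cols < 0 := by
      have h1 : 0 < i + 1 := by omega
      exact mul_neg_of_pos_of_neg h1 hc
    omega
  rw [hb, PySem.List.clampIdx_neg_natCast _ _ (by
    have : (i + 1) * cols < 0 := mul_neg_of_pos_of_neg (by omega) hc
    omega)]
  have hk : (ls.map (fun x => if x == 1 then '*' else ' ')).length ≤ (-((i + 1) * cols)).toNat := by
    simp only [List.length_map]
    have h1 : -cols ≤ (i + 1) * (-cols) := by nlinarith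
    have h2 : (i + 1) * (-cols) = -((i + 1) * cols) := by ring
    omega
  omega

-- ===== VERDICT (by name: the statement is the Claim_ definition above) =====
theorem make_pretty_spec : Claim_equal_make_pretty := by
  intro dims ls _ hpre
  obtain ⟨rows, cols⟩ := dims
  unfold Spec_make_pretty make_pretty make_pretty_alt
  simp only
  congr 1
  rw [PySem.List.foldl_append_eq_flatMap, List.nil_append,
      List.flatten_eq_flatMap, List.flatMap_map]
  apply List.flatMap_congr
  intro i hi
  rw [PySem.List.mem_pyRange_one] at hi
  simp only [id]
  congr 1
  rw [PySem.List.foldl_append_singleton_eq_map, List.nil_append]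
  have hrowpos : 0 < rows := by omega
  unfold Pre_make_pretty at hpre
  rcases hpre with h | h | h
  · omega
  · apply row_eq cols ls i hi.1 h.1
    intro hc
    have h2 : (i + 1) * cols ≤ rows * cols := by
      apply mul_le_mul_of_nonneg_right _ (le_of_lt hc)
      omega
    exact le_trans h2 h.2
  · exact row_eq_neg cols ls i hi.1 h.1 h.2
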